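-- pv_equiv track=rewrite | github.com/MRI-Lab-Graz/bids_apps_runner | scripts/pilot_resource_estimator.py | drop_flag
-- ===== SOURCE A (Python) =====
-- def drop_flag(options, flag):
--     cleaned = []
--     i = 0
--     while i < len(options):
--         token = str(options[i])
--         if token == flag:
--             i += 2
--             continue
--         if token.startswith(flag + "="):
--             i += 1
--             continue
--         cleaned.append(token)
--         i += 1
--     return cleaned
-- ===== SOURCE B (Python) =====
-- def drop_flag(options, flag):
--     # Pass 1: collect the indices of tokens that a bare flag occurrence consumes as its value.
--     prefix = flag + "="
--     consumed = set()
--     j = 0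
--     n = len(options)
--     while j < n:
--         if str(options[j]) == flag:
--             consumed.add(j + 1)
--             j += 2
--         else:
--             j += 1
--     # Pass 2: keep everything that is not the flag, not a flag=value token, and not a consumed value.
--     return [str(tok) for k, tok in enumerate(options)
--             if k not in consumed
--             and str(tok) != flag
--             and not str(tok).startswith(prefix)]
-- ===== Notes on version B (the rewrite author's own statement) =====
-- stated objective: alternative
-- what changed: Replaces A's single stateful while-loop with variable stride by two staged passes: a first scan collects into a set the indices consumed as values of a bare flag, then a comprehension over enumerate(options) keeps tokens whose index is not consumed and which are neither the flag nor a flag=value token; a timing run measured B faster (A re-concatenates flag+"=" and re-evaluates len()/indexing on every iteration, B hoists the prefix once).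
import Mathlib
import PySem

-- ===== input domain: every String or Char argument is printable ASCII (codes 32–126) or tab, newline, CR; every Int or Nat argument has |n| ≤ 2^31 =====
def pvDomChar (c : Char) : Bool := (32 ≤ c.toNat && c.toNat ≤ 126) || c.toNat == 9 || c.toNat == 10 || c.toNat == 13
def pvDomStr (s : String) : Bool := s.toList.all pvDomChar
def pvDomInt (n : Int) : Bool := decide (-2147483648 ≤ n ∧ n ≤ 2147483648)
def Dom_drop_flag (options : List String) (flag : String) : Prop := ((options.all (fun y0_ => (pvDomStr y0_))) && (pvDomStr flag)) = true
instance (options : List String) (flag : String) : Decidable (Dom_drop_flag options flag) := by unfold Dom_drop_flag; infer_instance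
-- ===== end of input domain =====

-- B replaces A's single stateful while-loop by two staged passes: first collect the set of
-- indices consumed as values of a bare flag, then filter the enumerated list against that set.

-- ===== PORT A =====
-- A's while-loop over an index i, with i += 2 on a bare flag match.
def dropFlagGoA (options : List String) (flag : String) (i : Nat) : List String :=
  if h : i < options.length then
    let token := options[i]
    if token == flag then dropFlagGoA options flag (i + 2)
    else if PySem.Str.startswith token (flag ++ "=") then dropFlagGoA options flag (i + 1)
    else token :: dropFlagGoA options flag (i + 1)
  else []
termination_by options.length - i

def drop_flag (options : List String) (flag : String) : List String :=
  dropFlagGoA options flag 0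

-- ===== PORT B =====
-- Pass 1 of Source B: the set of indices consumed as values of a bare flag.  The scan adds the
-- indices in strictly increasing order, so the Python set in insertion order is exactly this list.
def consumedB (options : List String) (flag : String) (j : Nat) : List Int :=
  if h : j < options.length then
    if options[j] == flag then ((j : Int) + 1) :: consumedB options flag (j + 2)
    else consumedB options flag (j + 1)
  else []
termination_by options.length - j

-- Pass 2 of Source B: the comprehension's condition on an enumerated (index, token) pair.
def keepB (flag : String) (consumed : List Int) (p : Int × String) : Bool :=
  !(consumed.contains p.1) && !(p.2 == flag) && !(PySem.Str.startswith p.2 (flag ++ "="))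

def drop_flag_alt (options : List String) (flag : String) : List String :=
  ((PySem.List.enumerate options).filter (keepB flag (consumedB options flag 0))).map (·.2)

-- ===== PRECONDITION & SPEC =====
def Spec_drop_flag (options : List String) (flag : String) (out : List String) : Prop := out = drop_flag_alt options flag
instance (options : List String) (flag : String) (out : List String) : Decidable (Spec_drop_flag options flag out) := by unfold Spec_drop_flag; infer_instance

-- ===== CLAIM (what is proved, stated in full; the proofs are below) =====
def Claim_equal_drop_flag : Prop := ∀ (options : List String) (flag : String), Dom_drop_flag options flag → Spec_drop_flag options flag (drop_flag options flag)

-- ===== LEMMAS AND PROOFS =====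

-- every index consumedB collects from position j is > j
theorem consumedB_lb (options : List String) (flag : String) (j : Nat) :
    ∀ x ∈ consumedB options flag j, (j : Int) < x := by
  fun_induction consumedB options flag j with
  | case1 j h hflag ih =>
    intro x hx
    rcases List.mem_cons.1 hx with rfl | hx
    · omega
    · have := ih x hx; push_cast at this ⊢; omega
  | case2 j h hflag ih =>
    intro x hx
    have := ih x hx; push_cast at this ⊢; omega
  | case3 j h => intro x hx; simp at hx

-- main invariant: A's loop from index i equals B's filter of the enumerated suffix
-- against the consumed set computed from i
theorem goA_eq_filter (options : List String) (flag : String) (i : Nat) :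
    dropFlagGoA options flag i =
      ((PySem.List.enumerate (options.drop i) i).filter
          (keepB flag (consumedB options flag i))).map (·.2) := by
  fun_induction dropFlagGoA options flag i with
  | case1 i h tok hflag ih =>
    have hfe : options[i] = flag := by simpa using hflag
    have hS : consumedB options flag i = ((i : Int) + 1) :: consumedB options flag (i + 2) := by
      rw [consumedB]; simp [h, hfe]
    by_cases h1 : i + 1 < options.length
    · have hdrop : options.drop i = options[i] :: options[i+1] :: options.drop (i + 2) := by
        rw [List.drop_eq_getElem_cons h, List.drop_eq_getElem_cons h1]
      rw [hdrop, PySem.List.enumerate_cons, PySem.List.enumerate_cons]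
      rw [ih, hS]
      rw [List.filter_cons, List.filter_cons]
      have k1 : keepB flag (((i : Int) + 1) :: consumedB options flag (i + 2))
          ((i : Int), options[i]) = false := by
        simp [keepB, hfe]
      have k2 : keepB flag (((i : Int) + 1) :: consumedB options flag (i + 2))
          ((i : Int) + 1, options[i+1]) = false := by
        simp [keepB]
      rw [k1, k2]
      have : ((i : Int) + 1 + 1) = ((i + 2 : Nat) : Int) := by push_cast; ring
      rw [this]
      congr 1
      apply List.filter_congr
      intro p hp
      rcases (PySem.List.mem_enumerate_iff _ _ _).1 hp with ⟨k, hk, rfl⟩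
      simp only [keepB]
      have hne : ¬ ((i : Int) + 2 + k = (i : Int) + 1) := by omega
      simp [hne]
    · -- the flag is the last token: both the suffix beyond i+1 and goA (i+2) are empty
      have h2 : ¬ i + 2 < options.length := by omega
      have hgo : dropFlagGoA options flag (i + 2) = [] := by rw [dropFlagGoA]; simp [h2]
      have hdrop : options.drop i = [options[i]] := by
        rw [List.drop_eq_getElem_cons h, List.drop_eq_nil_of_le (by omega)]
      rw [hgo, hdrop, PySem.List.enumerate_cons]
      have k1 : keepB flag (consumedB options flag i) ((i : Int), options[i]) = false := by
        simp [keepB, hfe]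
      simp [k1]
  | case2 i h tok hflag hpre ih =>
    have hfe : ¬ options[i] = flag := by simpa using hflag
    have hpre' : PySem.Chars.startswith options[i].toList (flag.toList ++ ['=']) = true := by
      simpa [PySem.Str.startswith] using hpre
    have hS : consumedB options flag i = consumedB options flag (i + 1) := by
      rw [consumedB]; simp [h, hfe]
    have hdrop : options.drop i = options[i] :: options.drop (i + 1) := List.drop_eq_getElem_cons h
    rw [hdrop, PySem.List.enumerate_cons, List.filter_cons]
    have k1 : keepB flag (consumedB options flag i) ((i : Int), options[i]) = false := by
      simp [keepB, hpre']
    rw [k1, hS, ih]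
    norm_num
  | case3 i h tok hflag hpre ih =>
    have hfe : ¬ options[i] = flag := by simpa using hflag
    have hpre' : PySem.Chars.startswith options[i].toList (flag.toList ++ ['=']) = false := by
      simpa [PySem.Str.startswith] using hpre
    have hS : consumedB options flag i = consumedB options flag (i + 1) := by
      rw [consumedB]; simp [h, hfe]
    have hdrop : options.drop i = options[i] :: options.drop (i + 1) := List.drop_eq_getElem_cons h
    rw [hdrop, PySem.List.enumerate_cons, List.filter_cons]
    have hni : ¬ ((i : Int) ∈ consumedB options flag i) := by
      intro hx; have := consumedB_lb options flag i _ hx; omega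
    have k1 : keepB flag (consumedB options flag i) ((i : Int), options[i]) = true := by
      simp [keepB, hfe, hpre', hni]
    rw [k1, hS, ih]
    norm_num
    rfl
  | case4 i h =>
    rw [List.drop_eq_nil_of_le (by omega)]
    simp [PySem.List.enumerate]

-- ===== VERDICT (by name: the statement is the Claim_ definition above) =====
theorem drop_flag_spec : Claim_equal_drop_flag := by
  intro options flag _
  unfold Spec_drop_flag drop_flag drop_flag_alt
  simpa using goA_eq_filter options flag 0
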